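-- pv_equiv track=rewrite | github.com/sunilgitb/DSAlgo-Python | 22_Math/27. Vus the Cossack and Strings.py | count_matching_parity_windows
-- ===== SOURCE A (Python) =====
-- def count_matching_parity_windows(a: str, b: str) -> int:
--     """
--     Given two binary strings a and b,
--     count the number of contiguous subarrays in a of length len(b)
--     that have the same parity of 1's as b (i.e., same XOR of all bits).
--
--     Time: O(n)
--     Space: O(1)
--     """
--     n = len(a)
--     m = len(b)
--
--     if m > n:
--         return 0
--
--     # Compute XOR (parity) of b
--     xor_b = 0
--     for char in b:
--         xor_b ^= int(char)
--
--     # Compute initial XOR for a[0..m-1]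
--     xor_window = 0
--     for i in range(m):
--         xor_window ^= int(a[i])
--
--     count = 0
--     if xor_window == xor_b:
--         count += 1
--
--     # Slide the window
--     for i in range(m, n):
--         # Remove a[i-m] and add a[i]
--         xor_window ^= int(a[i - m])
--         xor_window ^= int(a[i])
--
--         if xor_window == xor_b:
--             count += 1
--
--     return count
-- ===== SOURCE B (Python) =====
-- def count_matching_parity_windows(a: str, b: str) -> int:
--     n, m = len(a), len(b)
--     if m > n:
--         return 0
--     xor_b = 0
--     for ch in b:
--         xor_b ^= int(ch)
--     # prefix-xor table: pref[i] = XOR of int(a[0..i-1])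
--     pref = [0]
--     for ch in a:
--         pref.append(pref[-1] ^ int(ch))
--     return sum(1 for i in range(n - m + 1) if pref[i + m] ^ pref[i] == xor_b)
-- ===== Notes on version B (the rewrite author's own statement) =====
-- stated objective: alternative
-- what changed: B builds a full prefix-XOR table in one pass and then counts index pairs (i, i+m) whose table entries XOR to b's parity, replacing A's incrementally maintained sliding-window XOR with its remove/add updates.
import Mathlib
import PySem

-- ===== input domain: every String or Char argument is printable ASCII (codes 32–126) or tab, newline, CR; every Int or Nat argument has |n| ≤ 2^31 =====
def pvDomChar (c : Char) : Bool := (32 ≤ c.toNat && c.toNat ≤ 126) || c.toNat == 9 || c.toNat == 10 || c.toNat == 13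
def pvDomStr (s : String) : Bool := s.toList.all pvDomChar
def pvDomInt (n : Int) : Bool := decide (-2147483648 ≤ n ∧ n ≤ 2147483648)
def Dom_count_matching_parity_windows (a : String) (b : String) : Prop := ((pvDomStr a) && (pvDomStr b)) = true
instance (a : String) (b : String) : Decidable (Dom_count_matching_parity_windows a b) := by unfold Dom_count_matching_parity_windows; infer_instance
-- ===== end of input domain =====

-- B replaces A's incrementally maintained sliding-window XOR with a prefix-XOR table
-- built in one pass, then counts index pairs from the table (alternative decomposition,
-- same asymptotic cost). Equivalence is proved on Pre_ (where the Python A returns).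

-- int(c) for a single digit character (both Pythons raise on non-digits; see Pre_)
def pvDig (c : Char) : Nat := c.toNat - 48

-- ===== PORT A =====
def count_matching_parity_windows (a : String) (b : String) : Int :=
  let al := a.toList
  let bl := b.toList
  let n := al.length
  let m := bl.length
  if m > n then 0
  else
    let xor_b := bl.foldl (fun s c => s ^^^ pvDig c) 0
    -- for i in range(m): xor_window ^= int(a[i])  — iterates a's first m characters
    let xor_w := (al.take m).foldl (fun s c => s ^^^ pvDig c) 0
    let count : Int := if xor_w = xor_b then 1 else 0
    -- for i in range(m, n): slide the window (state = (xor_window, count))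
    let st := (List.range (n - m)).foldl
      (fun (st : Nat × Int) j =>
        let i := m + j
        let w := st.1 ^^^ pvDig (al.getD (i - m) ' ') ^^^ pvDig (al.getD i ' ')
        (w, if w = xor_b then st.2 + 1 else st.2))
      (xor_w, count)
    st.2

-- ===== PORT B =====
def count_matching_parity_windows_alt (a : String) (b : String) : Int :=
  let al := a.toList
  let bl := b.toList
  let n := al.length
  let m := bl.length
  if m > n then 0
  else
    let xor_b := bl.foldl (fun s c => s ^^^ pvDig c) 0
    -- pref = [0]; for ch in a: pref.append(pref[-1] ^ int(ch))
    let pref := al.foldl (fun p c => p ++ [p.getLast?.getD 0 ^^^ pvDig c]) [0]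
    -- sum(1 for i in range(n-m+1) if pref[i+m] ^ pref[i] == xor_b)
    (((List.range (n - m + 1)).filter
      (fun i => pref.getD (i + m) 0 ^^^ pref.getD i 0 == xor_b)).length : Int)

-- ===== PRECONDITION & SPEC =====
-- Pre_ = exactly where the Python A returns: either m > n (early return 0, no character
-- is ever converted) or every character of a and b is a decimal digit; outside it
-- int(char) raises ValueError in both A and B.
def Pre_count_matching_parity_windows (a : String) (b : String) : Prop :=
  b.toList.length > a.toList.length ∨
    (a.toList.all (fun c => c.isDigit) = true ∧ b.toList.all (fun c => c.isDigit) = true)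
instance (a : String) (b : String) : Decidable (Pre_count_matching_parity_windows a b) := by
  unfold Pre_count_matching_parity_windows; infer_instance

def pvWitness_count_matching_parity_windows : String × String := ("010110", "11")

def Spec_count_matching_parity_windows (a : String) (b : String) (out : Int) : Prop := out = count_matching_parity_windows_alt a b
instance (a : String) (b : String) (out : Int) : Decidable (Spec_count_matching_parity_windows a b out) := by unfold Spec_count_matching_parity_windows; infer_instance

-- ===== CLAIM (what is proved, stated in full; the proofs are below) =====
def Claim_equal_count_matching_parity_windows : Prop := ∀ (a : String) (b : String), Dom_count_matching_parity_windows a b → Pre_count_matching_parity_windows a b → Spec_count_matching_parity_windows a b (count_matching_parity_windows a b)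

-- ===== LEMMAS AND PROOFS =====

-- prefix parity: XOR of the digit values of the first i characters
def pvP (al : List Char) (i : Nat) : Nat :=
  (al.take i).foldl (fun s c => s ^^^ pvDig c) 0

theorem pvP_zero (al : List Char) : pvP al 0 = 0 := rfl

theorem pvP_succ (al : List Char) (j : Nat) (h : j < al.length) :
    pvP al (j + 1) = pvP al j ^^^ pvDig (al.getD j ' ') := by
  unfold pvP
  rw [List.take_add_one, List.foldl_append]
  simp [List.getElem?_eq_getElem h, List.getD]

-- the appending loop of B builds exactly the scanl of the xor step
theorem pvBuild_eq_scanl (l : List Char) (init : List Nat) (x : Nat) :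
    l.foldl (fun p c => p ++ [p.getLast?.getD 0 ^^^ pvDig c]) (init ++ [x])
      = init ++ List.scanl (fun s c => s ^^^ pvDig c) x l := by
  induction l generalizing init x with
  | nil => simp
  | cons c l ih =>
      simp only [List.foldl_cons, List.scanl_cons]
      have h1 : (init ++ [x]).getLast?.getD 0 = x := by
        simp [List.getLast?_append]
      rw [h1, ih (init ++ [x]) (x ^^^ pvDig c)]
      simp

theorem pvScanl_getD (l : List Char) (b i : Nat) (h : i ≤ l.length) :
    (List.scanl (fun s c => s ^^^ pvDig c) b l).getD i 0
      = (l.take i).foldl (fun s c => s ^^^ pvDig c) b := by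
  induction l generalizing b i with
  | nil =>
      have hi : i = 0 := by simpa using h
      subst hi; simp
  | cons c l ih =>
      cases i with
      | zero => simp
      | succ i =>
          simp only [List.scanl_cons, List.getD_cons_succ, List.take_succ_cons,
            List.foldl_cons]
          exact ih (b ^^^ pvDig c) i (by simpa using h)

theorem pvPref_getD (al : List Char) (i : Nat) (h : i ≤ al.length) :
    (al.foldl (fun p c => p ++ [p.getLast?.getD 0 ^^^ pvDig c]) [0]).getD i 0 = pvP al i := by
  have hb := pvBuild_eq_scanl al [] 0
  simp only [List.nil_append] at hb
  rw [hb, pvScanl_getD al 0 i h]; rfl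

-- invariant of A's sliding fold
theorem pvSlide (al : List Char) (m xor_b : Nat) (k : Nat) (hk : m + k ≤ al.length) :
    (List.range k).foldl
      (fun (st : Nat × Int) j =>
        (st.1 ^^^ pvDig (al.getD (m + j - m) ' ') ^^^ pvDig (al.getD (m + j) ' '),
         if st.1 ^^^ pvDig (al.getD (m + j - m) ' ') ^^^ pvDig (al.getD (m + j) ' ') = xor_b
           then st.2 + 1 else st.2))
      (pvP al m, if pvP al m = xor_b then (1 : Int) else 0)
    = (pvP al k ^^^ pvP al (m + k),
       ((List.range (k + 1)).countP (fun i => pvP al i ^^^ pvP al (i + m) == xor_b) : Int)) := by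
  induction k with
  | zero =>
      simp only [List.range_zero, List.foldl_nil, Nat.add_zero, List.range_one,
        List.countP_cons, List.countP_nil, pvP_zero, Nat.zero_xor, Nat.zero_add]
      by_cases h : pvP al m = xor_b <;> simp [h]
  | succ k ih =>
      have hk' : m + k ≤ al.length := by omega
      rw [List.range_succ, List.foldl_append, ih hk']
      simp only [List.foldl_cons, List.foldl_nil]
      have h1 : m + k - m = k := by omega
      have hka : k < al.length := by omega
      have hmka : m + k < al.length := by omega
      have hw : (pvP al k ^^^ pvP al (m + k)) ^^^ pvDig (al.getD k ' ') ^^^ pvDig (al.getD (m + k) ' ')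
          = pvP al (k + 1) ^^^ pvP al (m + (k + 1)) := by
        rw [pvP_succ al k hka, show m + (k + 1) = (m + k) + 1 by omega, pvP_succ al (m + k) hmka]
        simp only [Nat.xor_assoc]
        rw [← Nat.xor_assoc (pvP al (m + k)) (pvDig (al.getD k ' ')) (pvDig (al.getD (m + k) ' ')),
          Nat.xor_comm (pvP al (m + k)) (pvDig (al.getD k ' ')), Nat.xor_assoc]
      rw [h1]
      simp only [Prod.mk.injEq]
      refine ⟨hw, ?_⟩
      rw [hw, show List.range (k + 1 + 1) = List.range (k + 1) ++ [k + 1] from List.range_succ,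
        List.countP_append, List.countP_cons, List.countP_nil,
        show m + (k + 1) = (k + 1) + m by omega]
      by_cases h : pvP al (k + 1) ^^^ pvP al (k + 1 + m) = xor_b
      · simp [h]
      · simp [h]

-- ===== VERDICT (by name: the statement is the Claim_ definition above) =====
theorem count_matching_parity_windows_spec : Claim_equal_count_matching_parity_windows := by
  intro a b _ _
  unfold Spec_count_matching_parity_windows
  simp only [count_matching_parity_windows, count_matching_parity_windows_alt]
  by_cases hmn : b.toList.length > a.toList.length
  · rw [if_pos hmn, if_pos hmn]
  · rw [if_neg hmn, if_neg hmn]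
    have hxw : (a.toList.take b.toList.length).foldl (fun s c => s ^^^ pvDig c) 0
        = pvP a.toList b.toList.length := rfl
    rw [hxw, pvSlide a.toList b.toList.length _ (a.toList.length - b.toList.length) (by omega)]
    dsimp only
    rw [← List.countP_eq_length_filter]
    norm_cast
    apply List.countP_congr
    intro i hi
    have hi' : i < a.toList.length - b.toList.length + 1 := List.mem_range.mp hi
    rw [pvPref_getD a.toList (i + b.toList.length) (by omega),
        pvPref_getD a.toList i (by omega), Nat.xor_comm]
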